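-- pv_equiv track=rewrite | github.com/jakeru/adventofcode | 2017/solve3.py | first_in_ring
-- ===== SOURCE A (Python) =====
-- cache = {}
--
-- def cache_get(type, key):
--     c = cache.get(type)
--     if c is None:
--         return None
--     return c.get(key)
--
-- def cache_set(type, key, value):
--     if not type in cache:
--         cache[type] = {}
--     cache[type][key] = value
--     return value
--
-- def digits_in_ring(r):
--     if r == 0:
--         return 1
--     return 8 * r
--
-- def first_in_ring(r):
--     c = cache_get('first_in_ring', r)
--     if c is not None:
--         return c
--     sum = 1
--     for i in range(0, r):
--         sum += digits_in_ring(i)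
--     return cache_set('first_in_ring', r, sum)
-- ===== SOURCE B (Python) =====
-- def first_in_ring(r):
--     if r <= 0:
--         return 1
--     return 2 + 4 * r * (r - 1)
-- ===== Notes on version B (the rewrite author's own statement) =====
-- stated objective: faster
-- what changed: Replaced the O(r) summation loop (and its cache) with the closed-form arithmetic-series formula 2 + 4r(r-1), returning 1 for r <= 0.
import Mathlib
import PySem

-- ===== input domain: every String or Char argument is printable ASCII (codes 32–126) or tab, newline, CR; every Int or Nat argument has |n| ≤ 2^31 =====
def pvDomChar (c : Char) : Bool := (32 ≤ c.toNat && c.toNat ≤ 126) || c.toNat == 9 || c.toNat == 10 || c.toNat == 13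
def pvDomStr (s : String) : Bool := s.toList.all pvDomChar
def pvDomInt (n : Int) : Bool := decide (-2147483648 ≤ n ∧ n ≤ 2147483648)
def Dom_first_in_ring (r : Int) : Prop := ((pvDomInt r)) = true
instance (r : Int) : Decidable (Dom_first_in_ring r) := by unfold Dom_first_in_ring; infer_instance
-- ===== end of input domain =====

-- B replaces A's O(r) summation loop with the closed-form 2 + 4r(r-1) (1 for r ≤ 0);
-- equivalence is about the return value only (A also memoizes into a module-level cache).

-- ===== PORT A =====
-- helper digits_in_ring, as in A
def digits_in_ring (r : Int) : Int := if r = 0 then 1 else 8 * r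

-- On a fresh cache the cache_get lookup misses and cache_set returns the computed sum,
-- so the returned value is the loop's sum; the cache affects no return value.
def first_in_ring (r : Int) : Int :=
  (PySem.List.pyRange 0 r 1).foldl (fun sum i => sum + digits_in_ring i) 1

-- ===== PORT B =====
def first_in_ring_alt (r : Int) : Int :=
  if r ≤ 0 then 1 else 2 + 4 * r * (r - 1)

-- ===== PRECONDITION & SPEC =====
def Spec_first_in_ring (r : Int) (out : Int) : Prop := out = first_in_ring_alt r
instance (r : Int) (out : Int) : Decidable (Spec_first_in_ring r out) := by unfold Spec_first_in_ring; infer_instance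

-- ===== CLAIM (what is proved, stated in full; the proofs are below) =====
def Claim_equal_first_in_ring : Prop := ∀ (r : Int), Dom_first_in_ring r → Spec_first_in_ring r (first_in_ring r)

-- ===== LEMMAS AND PROOFS =====
lemma fir_nat (n : Nat) :
    (PySem.List.pyRange 0 (n : Int) 1).foldl (fun sum i => sum + digits_in_ring i) 1
      = if (n : Int) ≤ 0 then 1 else 2 + 4 * (n : Int) * ((n : Int) - 1) := by
  induction n with
  | zero => simp [PySem.List.pyRange_one_eq_nil]
  | succ m ih =>
    rw [show ((m + 1 : Nat) : Int) = (m : Int) + 1 by push_cast; ring,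
        PySem.List.pyRange_one_succ_right (by positivity)]
    rw [List.foldl_append, ih]
    by_cases hm : (m : Int) ≤ 0
    · have : m = 0 := by omega
      subst this
      simp [digits_in_ring]
    · have h1 : ¬ ((m : Int) + 1 ≤ 0) := by omega
      have h2 : (m : Int) ≠ 0 := by omega
      simp only [hm, if_neg h1, if_false, List.foldl_cons, List.foldl_nil,
        digits_in_ring, if_neg h2]
      ring

-- ===== VERDICT (by name: the statement is the Claim_ definition above) =====
theorem first_in_ring_spec : Claim_equal_first_in_ring := by
  intro r _
  unfold Spec_first_in_ring first_in_ring first_in_ring_alt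
  by_cases hr : r ≤ 0
  · rw [PySem.List.pyRange_one_eq_nil hr]
    simp [hr]
  · obtain ⟨n, rfl⟩ : ∃ n : Nat, r = (n : Int) :=
      ⟨r.toNat, by omega⟩
    exact fir_nat n
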